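-- pv_equiv track=rewrite | github.com/StarDuster/YAYD | src/youdub/steps/translate/__init__.py | _merge_parts_to_count
-- ===== SOURCE A (Python) =====
-- def _merge_parts_to_count(parts: list[str], target_count: int) -> list[str]:
--     if target_count <= 0:
--         return []
--     cleaned = [p.strip() for p in parts if p and p.strip()]
--     if not cleaned:
--         return [""] * target_count
--     if len(cleaned) == target_count:
--         return cleaned
--     if len(cleaned) < target_count:
--         return cleaned + [""] * (target_count - len(cleaned))
--
--     n = len(cleaned)
--     out: list[str] = []
--     for i in range(target_count):
--         a = i * n // target_count
--         b = (i + 1) * n // target_count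
--         out.append(" ".join(cleaned[a:b]).strip())
--     return out
-- ===== SOURCE B (Python) =====
-- def _merge_parts_to_count(parts: list[str], target_count: int) -> list[str]:
--     if target_count <= 0:
--         return []
--     cleaned = [p.strip() for p in parts if p and p.strip()]
--     n = len(cleaned)
--     if n == 0:
--         return [""] * target_count
--     if n == target_count:
--         return cleaned
--     if n < target_count:
--         return cleaned + [""] * (target_count - n)
--
--     # element-major bucketing: one pass over the words, each word goes to
--     # bucket ((j+1)*target_count - 1) // n, which reproduces the floor
--     # boundaries i*n//target_count of the group-major slicing.
--     buckets: list[list[str]] = [[] for _ in range(target_count)]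
--     for j, w in enumerate(cleaned):
--         buckets[((j + 1) * target_count - 1) // n].append(w)
--     return [" ".join(b).strip() for b in buckets]
-- ===== Notes on version B (the rewrite author's own statement) =====
-- stated objective: alternative
-- what changed: Group-major loop that slices cleaned[i*n//t:(i+1)*n//t] for each output group is replaced by a single element-major pass that drops each word into bucket ((j+1)*t-1)//n and joins the buckets afterwards.
import Mathlib
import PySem

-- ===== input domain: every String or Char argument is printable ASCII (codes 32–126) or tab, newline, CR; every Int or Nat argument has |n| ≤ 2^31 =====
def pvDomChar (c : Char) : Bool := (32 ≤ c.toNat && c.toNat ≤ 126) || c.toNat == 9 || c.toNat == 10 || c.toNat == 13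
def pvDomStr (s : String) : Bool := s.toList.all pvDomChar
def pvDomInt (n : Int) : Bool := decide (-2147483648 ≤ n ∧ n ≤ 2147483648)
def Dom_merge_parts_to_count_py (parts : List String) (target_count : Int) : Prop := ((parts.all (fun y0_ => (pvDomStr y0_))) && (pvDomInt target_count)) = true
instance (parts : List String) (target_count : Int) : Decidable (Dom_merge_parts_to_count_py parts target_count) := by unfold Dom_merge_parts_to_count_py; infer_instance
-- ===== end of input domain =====

-- B replaces A's group-major slicing loop by a single element-major pass into buckets; objective: alternative decomposition (same cost).

-- ===== PORT A =====
def merge_parts_to_count_py (parts : List String) (target_count : Int) : List String :=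
  if target_count ≤ 0 then []
  else
    let cleaned := (parts.filter (fun p => p != "" && PySem.Str.strip p != "")).map PySem.Str.strip
    if cleaned = [] then PySem.List.pyRepeat [""] target_count
    else if (cleaned.length : Int) = target_count then cleaned
    else if (cleaned.length : Int) < target_count then
      cleaned ++ PySem.List.pyRepeat [""] (target_count - (cleaned.length : Int))
    else
      let n : Int := cleaned.length
      (PySem.List.pyRange 0 target_count 1).foldl
        (fun out i =>
          out ++ [PySem.Str.strip (PySem.Str.join " "
            (PySem.List.slice cleaned (some (PySem.Int.floordiv (i * n) target_count))
              (some (PySem.Int.floordiv ((i + 1) * n) target_count))))])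
        []

-- ===== PORT B =====
def merge_parts_to_count_py_alt (parts : List String) (target_count : Int) : List String :=
  if target_count ≤ 0 then []
  else
    let cleaned := (parts.filter (fun p => p != "" && PySem.Str.strip p != "")).map PySem.Str.strip
    let n : Int := cleaned.length
    if n = 0 then PySem.List.pyRepeat [""] target_count
    else if n = target_count then cleaned
    else if n < target_count then cleaned ++ PySem.List.pyRepeat [""] (target_count - n)
    else
      -- the bucket index ((j+1)*target_count - 1) // n is in [0, target_count), so .toNat is exact
      let buckets := (PySem.List.enumerate cleaned 0).foldl
        (fun (bs : List (List String)) jw =>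
          bs.modify (PySem.Int.floordiv ((jw.1 + 1) * target_count - 1) n).toNat (fun b => b ++ [jw.2]))
        (List.replicate target_count.toNat [])
      buckets.map (fun b => PySem.Str.strip (PySem.Str.join " " b))

-- ===== PRECONDITION & SPEC =====
def Spec_merge_parts_to_count_py (parts : List String) (target_count : Int) (out : List String) : Prop := out = merge_parts_to_count_py_alt parts target_count
instance (parts : List String) (target_count : Int) (out : List String) : Decidable (Spec_merge_parts_to_count_py parts target_count out) := by unfold Spec_merge_parts_to_count_py; infer_instance

-- ===== CLAIM (what is proved, stated in full; the proofs are below) =====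
def Claim_equal_merge_parts_to_count_py : Prop := ∀ (parts : List String) (target_count : Int), Dom_merge_parts_to_count_py parts target_count → Spec_merge_parts_to_count_py parts target_count (merge_parts_to_count_py parts target_count)

-- ===== LEMMAS AND PROOFS =====

lemma foldl_push {α β : Type} (f : α → β) (l : List α) (acc : List β) :
    l.foldl (fun out x => out ++ [f x]) acc = acc ++ l.map f := by
  induction l generalizing acc with
  | nil => simp
  | cons x xs ih => simp [List.foldl_cons, ih]

-- the bucket index of word j is i exactly when j lies in A's i-th slice [i*N/T, (i+1)*N/T)
lemma bucket_eq_iff (T N i j : Nat) (hT : 0 < T) (hN : 0 < N) :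
    ((j + 1) * T - 1) / N = i ↔ i * N / T ≤ j ∧ j < (i + 1) * N / T := by
  have h1 : i * N / T ≤ j ↔ i * N < (j + 1) * T := by
    rw [← Nat.lt_succ_iff, Nat.div_lt_iff_lt_mul hT]
  have h2 : j < (i + 1) * N / T ↔ (j + 1) * T ≤ (i + 1) * N := by
    rw [← Nat.succ_le_iff, Nat.le_div_iff_mul_le hT]
  have h3 : ((j + 1) * T - 1) / N = i ↔ i * N ≤ (j + 1) * T - 1 ∧ (j + 1) * T - 1 < (i + 1) * N := by
    constructor
    · rintro rfl
      refine ⟨Nat.div_mul_le_self _ _, ?_⟩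
      have hdm := Nat.div_add_mod ((j + 1) * T - 1) N
      have hm := Nat.mod_lt ((j + 1) * T - 1) hN
      nlinarith
    · rintro ⟨hl, hr⟩
      exact Nat.div_eq_of_lt_le hl (by omega)
  rw [h1, h2, h3]
  have hpos : 1 ≤ (j + 1) * T := Nat.mul_pos (by omega) hT
  have ha : i * N ≤ (i + 1) * N := by nlinarith
  omega

-- prefix invariant for B's element-major bucket fold: after processing the first j words,
-- bucket i holds the part of A's i-th slice that lies among those j words
lemma buckets_inv (l : List String) (T : Nat) (hT : 0 < T) (hTN : T < l.length) :
    ∀ j, j ≤ l.length →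
      (PySem.List.enumerate (l.take j) 0).foldl
        (fun (bs : List (List String)) jw =>
          bs.modify (PySem.Int.floordiv ((jw.1 + 1) * (T : Int) - 1) (l.length : Int)).toNat
            (fun b => b ++ [jw.2]))
        (List.replicate T [])
      = (List.range T).map (fun i =>
          ((l.take j).drop (i * l.length / T)).take ((i + 1) * l.length / T - i * l.length / T)) := by
  intro j
  induction j with
  | zero =>
      intro _
      simp [PySem.List.enumerate_nil]
  | succ j ih =>
      intro hj
      have hN : 0 < l.length := by omega
      have hjN : j < l.length := by omega
      have htake : l.take (j + 1) = l.take j ++ [l[j]] := by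
        rw [List.take_add_one]
        simp [List.getElem?_eq_getElem hjN]
      have hlen : (l.take j).length = j := by simp; omega
      rw [htake, PySem.List.enumerate_append, List.foldl_append, ih (by omega), hlen]
      simp only [PySem.List.enumerate_cons, PySem.List.enumerate_nil, List.foldl_cons,
        List.foldl_nil]
      have hcast : ((0 : Int) + (j : Int) + 1) * (T : Int) - 1 = (((j + 1) * T - 1 : Nat) : Int) := by
        have h1 : 1 ≤ (j + 1) * T := Nat.mul_pos (by omega) hT
        push_cast [h1]
        ring
      rw [hcast, PySem.Int.floordiv_natCast, Int.toNat_natCast]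
      apply List.ext_getElem
      · simp
      · intro i hi1 hi2
        have hiT : i < T := by simpa using hi2
        rw [List.getElem_modify]
        simp only [List.getElem_map, List.getElem_range]
        rw [← htake]
        -- abbreviations
        have hdt : ∀ m, ((l.take m).drop (i * l.length / T)).take
              ((i + 1) * l.length / T - i * l.length / T)
            = (l.drop (i * l.length / T)).take
              (min ((i + 1) * l.length / T - i * l.length / T) (m - i * l.length / T)) := by
          intro m
          rw [List.drop_take, List.take_take]
        have hab : i * l.length / T ≤ (i + 1) * l.length / T :=
          Nat.div_le_div_right (by nlinarith)
        by_cases hgi : ((j + 1) * T - 1) / l.length = i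
        · -- word j belongs to slice i
          have hrange := (bucket_eq_iff T l.length i j hT hN).mp hgi
          simp only [if_pos hgi, hdt]
          have e1 : min ((i + 1) * l.length / T - i * l.length / T) (j - i * l.length / T)
              = j - i * l.length / T := by omega
          have e2 : min ((i + 1) * l.length / T - i * l.length / T) (j + 1 - i * l.length / T)
              = (j - i * l.length / T) + 1 := by omega
          rw [e1, e2, List.take_add_one]
          have hd : j - i * l.length / T < (l.drop (i * l.length / T)).length := by
            simp [List.length_drop]; omega
          rw [List.getElem?_eq_getElem hd]
          simp only [List.getElem_drop]
          have hidx : i * l.length / T + (j - i * l.length / T) = j := by omega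
          simp [hidx]
        · -- bucket i is untouched and slice i gains nothing
          have hrange : ¬ (i * l.length / T ≤ j ∧ j < (i + 1) * l.length / T) := fun h =>
            hgi ((bucket_eq_iff T l.length i j hT hN).mpr h)
          simp only [if_neg hgi, hdt]
          congr 1
          omega

lemma buckets_eq (l : List String) (T : Nat) (hT : 0 < T) (hTN : T < l.length) :
    (PySem.List.enumerate l 0).foldl
        (fun (bs : List (List String)) jw =>
          bs.modify (PySem.Int.floordiv ((jw.1 + 1) * (T : Int) - 1) (l.length : Int)).toNat
            (fun b => b ++ [jw.2]))
        (List.replicate T [])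
      = (List.range T).map (fun i =>
          (l.drop (i * l.length / T)).take ((i + 1) * l.length / T - i * l.length / T)) := by
  have h := buckets_inv l T hT hTN l.length le_rfl
  rwa [List.take_length] at h

-- ===== VERDICT (by name: the statement is the Claim_ definition above) =====
theorem merge_parts_to_count_py_spec : Claim_equal_merge_parts_to_count_py := by
  intro parts target_count _
  unfold Spec_merge_parts_to_count_py merge_parts_to_count_py merge_parts_to_count_py_alt
  by_cases ht : target_count ≤ 0
  · simp [ht]
  simp only [if_neg ht]
  set cleaned := (parts.filter (fun p => p != "" && PySem.Str.strip p != "")).map PySem.Str.strip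
    with hcl
  have hz : ((cleaned.length : Int) = 0) ↔ cleaned = [] := by
    simp [List.length_eq_zero_iff]
  by_cases h0 : cleaned = []
  · simp [h0]
  rw [if_neg h0, if_neg (fun h => h0 (hz.mp h))]
  by_cases heq : (cleaned.length : Int) = target_count
  · simp [heq]
  rw [if_neg heq, if_neg heq]
  by_cases hlt : (cleaned.length : Int) < target_count
  · simp [hlt]
  rw [if_neg hlt, if_neg hlt]
  -- main case: 0 < target_count < cleaned.length
  have htpos : 0 < target_count := by omega
  set T : Nat := target_count.toNat with hTdef
  have htT : (T : Int) = target_count := Int.toNat_of_nonneg (by omega)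
  have hT : 0 < T := by omega
  have hTN : T < cleaned.length := by
    have : target_count < (cleaned.length : Int) := by omega
    omega
  rw [← htT]
  rw [buckets_eq cleaned T hT hTN]
  rw [foldl_push (f := fun i => PySem.Str.strip (PySem.Str.join " "
      (PySem.List.slice cleaned (some (PySem.Int.floordiv (i * (cleaned.length : Int)) (T : Int)))
        (some (PySem.Int.floordiv ((i + 1) * (cleaned.length : Int)) (T : Int))))))]
  rw [PySem.List.pyRange_one]
  simp only [List.nil_append, List.map_map, Int.sub_zero, Int.toNat_natCast]
  apply List.map_congr_left
  intro k hk
  simp only [Function.comp]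
  have c1 : ((0 : Int) + (k : Int)) * (cleaned.length : Int) = ((k * cleaned.length : Nat) : Int) := by
    push_cast; ring
  have c2 : ((0 : Int) + (k : Int) + 1) * (cleaned.length : Int)
      = (((k + 1) * cleaned.length : Nat) : Int) := by
    push_cast; ring
  rw [c1, c2, PySem.Int.floordiv_natCast, PySem.Int.floordiv_natCast,
    PySem.List.slice_natCast]
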